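-- pv_equiv track=rewrite | github.com/chiptrontech/WiredQTv1.0 | WiredQT/examples/BySomeBody/b4a/ex_ScrollView/b4a_project/wta_module.py | getCSV
-- ===== SOURCE A (Python) =====
-- def getCSV(x,delimiter,str_data):
-- 	getCSVret = ""
-- 	if(x<0):
-- 		return ""       #if negative index
-- 	b = 0
-- 	while (x != 0):
-- 		if (str_data[b] == delimiter):
-- 			x = x - 1
-- 		b = b + 1
-- 	if(b>=len(str_data)):
-- 		return ""       #if index out of range
-- 	while ((str_data[b] != delimiter) and ((len(str_data)+1) != b)):
-- 		getCSVret = getCSVret + str_data[b]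
-- 		b = b + 1
-- 		if(b>=len(str_data)):
-- 			break
-- 	return getCSVret
-- ===== SOURCE B (Python) =====
-- def getCSV(x, delimiter, str_data):
--     if x < 0:
--         return ""          # negative index
--     # single pass: parse ALL fields (splitting on single characters equal to
--     # delimiter), then select the x-th one
--     parts = []
--     buf = []
--     for ch in str_data:
--         if ch == delimiter:
--             parts.append("".join(buf))
--             buf = []
--         else:
--             buf.append(ch)
--     parts.append("".join(buf))
--     return parts[x]
-- ===== Notes on version B (the rewrite author's own statement) =====
-- stated objective: alternative
-- what changed: B makes one pass that parses the whole string into the complete list of fields (char-by-char, splitting on single characters equal to the delimiter) and then indexes that list, instead of A's two-phase scan that first skips x delimiter characters and then reads one field.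
import Mathlib
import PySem

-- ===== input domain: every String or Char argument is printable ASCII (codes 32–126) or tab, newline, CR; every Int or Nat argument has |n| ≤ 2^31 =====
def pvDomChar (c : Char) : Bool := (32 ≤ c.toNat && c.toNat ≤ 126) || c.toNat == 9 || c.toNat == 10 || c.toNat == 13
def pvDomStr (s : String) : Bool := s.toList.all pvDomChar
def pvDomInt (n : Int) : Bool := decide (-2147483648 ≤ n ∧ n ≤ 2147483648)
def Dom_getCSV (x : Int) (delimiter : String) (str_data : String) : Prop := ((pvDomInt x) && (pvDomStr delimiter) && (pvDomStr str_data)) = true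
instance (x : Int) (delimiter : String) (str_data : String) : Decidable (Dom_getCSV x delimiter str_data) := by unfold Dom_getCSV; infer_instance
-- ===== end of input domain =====

-- B parses the whole string into the full list of fields in one pass and then indexes it,
-- instead of A's skip-x-delimiters-then-read-one-field two-phase scan; same cost (alternative).

-- ===== PORT A =====
-- first while loop of A: advance past x delimiter characters; none = IndexError (str_data[b] out of range)
def pvSkipA (delimiter : String) : Int → List Char → Option (List Char)
  | x, [] => if x = 0 then some [] else none
  | x, c :: rest =>
    if x = 0 then some (c :: rest)
    else pvSkipA delimiter (if String.mk [c] = delimiter then x - 1 else x) rest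

-- second while loop of A: accumulate characters until a delimiter character or the end
def pvReadA (delimiter : String) : List Char → List Char
  | [] => []
  | c :: rest => if String.mk [c] = delimiter then [] else c :: pvReadA delimiter rest

def getCSV (x : Int) (delimiter : String) (str_data : String) : String :=
  if x < 0 then ""
  else
    match pvSkipA delimiter x str_data.toList with
    | none => ""   -- Python raises IndexError here; excluded by Pre_getCSV
    | some rest => String.mk (pvReadA delimiter rest)

-- ===== PORT B =====
-- B's for-loop: carry (parts, buf); a char equal to the delimiter closes buf into parts
def pvPartsB (delimiter : String) : List String → List Char → List Char → List String
  | parts, buf, [] => parts ++ [String.mk buf]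
  | parts, buf, c :: rest =>
    if String.mk [c] = delimiter then pvPartsB delimiter (parts ++ [String.mk buf]) [] rest
    else pvPartsB delimiter parts (buf ++ [c]) rest

def getCSV_alt (x : Int) (delimiter : String) (str_data : String) : String :=
  if x < 0 then ""
  else PySem.List.pyGetD (pvPartsB delimiter [] [] str_data.toList) x ""
    -- parts[x]; out of range = IndexError, excluded by Pre_getCSV

-- ===== PRECONDITION & SPEC =====
-- A (and B) raise IndexError when 0 ≤ x exceeds the number of delimiter characters in str_data.
def Pre_getCSV (x : Int) (delimiter : String) (str_data : String) : Prop :=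
  x < 0 ∨ x ≤ (str_data.toList.countP (fun c => String.mk [c] = delimiter) : Int)
instance (x : Int) (delimiter : String) (str_data : String) : Decidable (Pre_getCSV x delimiter str_data) := by unfold Pre_getCSV; infer_instance
def pvWitness_getCSV : Int × String × String := (1, ",", "a,b")

def Spec_getCSV (x : Int) (delimiter : String) (str_data : String) (out : String) : Prop := out = getCSV_alt x delimiter str_data
instance (x : Int) (delimiter : String) (str_data : String) (out : String) : Decidable (Spec_getCSV x delimiter str_data out) := by unfold Spec_getCSV; infer_instance

-- ===== CLAIM (what is proved, stated in full; the proofs are below) =====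
def Claim_equal_getCSV : Prop := ∀ (x : Int) (delimiter : String) (str_data : String), Dom_getCSV x delimiter str_data → Pre_getCSV x delimiter str_data → Spec_getCSV x delimiter str_data (getCSV x delimiter str_data)

-- ===== LEMMAS AND PROOFS =====

-- the full field table of cs, as lists of characters
def pvFL (delimiter : String) : List Char → List (List Char)
  | [] => [[]]
  | c :: rest =>
    if String.mk [c] = delimiter then [] :: pvFL delimiter rest
    else
      match pvFL delimiter rest with
      | [] => []
      | h :: t => (c :: h) :: t

theorem pvFL_ne_nil (delimiter : String) (cs : List Char) : pvFL delimiter cs ≠ [] := by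
  induction cs with
  | nil => simp [pvFL]
  | cons c rest ih =>
    simp only [pvFL]
    split
    · simp
    · cases h : pvFL delimiter rest with
      | nil => exact absurd h ih
      | cons a t => simp

theorem pyGetD_cons_zero {α : Type} (a : α) (l : List α) (d : α) :
    PySem.List.pyGetD (a :: l) 0 d = a := by
  rw [PySem.List.pyGetD_of_nonneg _ _ le_rfl]
  simp

theorem pyGetD_cons_pos {α : Type} (a : α) (l : List α) (x : Int) (d : α) (hx : 1 ≤ x) :
    PySem.List.pyGetD (a :: l) x d = PySem.List.pyGetD l (x - 1) d := by
  rw [PySem.List.pyGetD_of_nonneg _ _ (by omega : (0:Int) ≤ x),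
      PySem.List.pyGetD_of_nonneg _ _ (by omega : (0:Int) ≤ x - 1)]
  have h : x.toNat = (x - 1).toNat + 1 := by omega
  rw [h]
  simp

-- B's loop computes the field table (prefixed with the pending buffer and accumulated parts)
theorem pvPartsB_eq (delimiter : String) (cs : List Char) :
    ∀ (parts : List String) (buf : List Char),
      pvPartsB delimiter parts buf cs =
        parts ++ (match pvFL delimiter cs with
                  | [] => []
                  | h :: t => String.mk (buf ++ h) :: t.map String.mk) := by
  induction cs with
  | nil => intro parts buf; simp [pvPartsB, pvFL]
  | cons c rest ih =>
    intro parts buf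
    simp only [pvPartsB, pvFL]
    by_cases hc : String.mk [c] = delimiter
    · simp only [hc, if_true]
      rw [ih]
      cases h : pvFL delimiter rest with
      | nil => exact absurd h (pvFL_ne_nil delimiter rest)
      | cons a t => simp
    · simp only [if_neg hc]
      rw [ih]
      cases h : pvFL delimiter rest with
      | nil => exact absurd h (pvFL_ne_nil delimiter rest)
      | cons a t => simp

theorem pvReadA_eq_head (delimiter : String) (cs : List Char) :
    ∀ (a : List Char) (t : List (List Char)), pvFL delimiter cs = a :: t → pvReadA delimiter cs = a := by
  induction cs with
  | nil => intro a t h; simp [pvFL] at h; simp [pvReadA, h.1]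
  | cons c rest ih =>
    intro a t h
    simp only [pvFL] at h
    by_cases hc : String.mk [c] = delimiter
    · rw [if_pos hc] at h
      simp [pvReadA, hc, (List.cons.injEq .. ▸ h).1.symm]
    · rw [if_neg hc] at h
      cases hF : pvFL delimiter rest with
      | nil => exact absurd hF (pvFL_ne_nil delimiter rest)
      | cons a' t' =>
        rw [hF] at h
        obtain ⟨h1, h2⟩ := List.cons.injEq .. ▸ h
        simp only [pvReadA, if_neg hc]
        rw [ih a' t' hF, h1]

-- A's two-phase scan selects the x-th entry of the field table
theorem pvA_eq_field (delimiter : String) (cs : List Char) :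
    ∀ (x : Int), 0 ≤ x → x ≤ (cs.countP (fun c => String.mk [c] = delimiter) : Int) →
      (match pvSkipA delimiter x cs with
       | none => []
       | some r => pvReadA delimiter r) =
      PySem.List.pyGetD (pvFL delimiter cs) x [] := by
  induction cs with
  | nil =>
    intro x hx0 hxc
    simp only [List.countP_nil, Nat.cast_zero] at hxc
    have hx : x = 0 := by omega
    subst hx
    simp [pvSkipA, pvReadA, pvFL]
  | cons c rest ih =>
    intro x hx0 hxc
    by_cases hx : x = 0
    · subst hx
      simp only [pvSkipA, if_true]
      cases hF : pvFL delimiter (c :: rest) with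
      | nil => exact absurd hF (pvFL_ne_nil delimiter (c :: rest))
      | cons a t =>
        rw [pyGetD_cons_zero]
        exact pvReadA_eq_head delimiter (c :: rest) a t hF
    · have hx1 : 1 ≤ x := by omega
      simp only [pvSkipA, if_neg hx]
      by_cases hc : String.mk [c] = delimiter
      · simp only [hc, if_true]
        have hcount : ((c :: rest).countP (fun c => String.mk [c] = delimiter) : Int) =
            (rest.countP (fun c => String.mk [c] = delimiter) : Int) + 1 := by
          simp [hc]
        have key := ih (x - 1) (by omega) (by omega)
        rw [key]
        simp only [pvFL, hc, if_true]
        rw [pyGetD_cons_pos _ _ _ _ hx1]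
      · simp only [if_neg hc]
        have hcount : ((c :: rest).countP (fun c => String.mk [c] = delimiter) : Int) =
            (rest.countP (fun c => String.mk [c] = delimiter) : Int) := by
          simp [hc]
        have key := ih x hx0 (by omega)
        rw [key]
        simp only [pvFL, if_neg hc]
        cases h : pvFL delimiter rest with
        | nil => exact absurd h (pvFL_ne_nil delimiter rest)
        | cons a t =>
          rw [pyGetD_cons_pos _ _ _ _ hx1, pyGetD_cons_pos _ _ _ _ hx1]

-- ===== VERDICT (by name: the statement is the Claim_ definition above) =====
theorem getCSV_spec : Claim_equal_getCSV := by
  intro x delimiter str_data _hdom hpre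
  unfold Spec_getCSV getCSV getCSV_alt
  by_cases hx : x < 0
  · simp [hx]
  · simp only [if_neg hx]
    have hx0 : 0 ≤ x := by omega
    have hxc : x ≤ ((str_data.toList).countP (fun c => String.mk [c] = delimiter) : Int) := by
      rcases hpre with h | h
      · omega
      · exact h
    rw [pvPartsB_eq]
    cases h : pvFL delimiter str_data.toList with
    | nil => exact absurd h (pvFL_ne_nil delimiter str_data.toList)
    | cons a t =>
      have key := pvA_eq_field delimiter str_data.toList x hx0 hxc
      rw [h] at key
      simp only [List.nil_append]
      rw [show ("" : String) = String.mk ([] : List Char) from rfl]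
      have hmap : String.mk a :: t.map String.mk = (a :: t).map String.mk := by simp
      rw [hmap, PySem.List.pyGetD_map, ← key]
      cases hs : pvSkipA delimiter x str_data.toList with
      | none => rfl
      | some r => rfl
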